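-- pv_equiv track=rewrite | github.com/Luyangt/my_chat2BI | app/services/nl2sql_service.py | _clean_sql
-- ===== SOURCE A (Python) =====
-- def _clean_sql(sql_query):
--     """清理SQL查询"""
--     # 移除代码块标记
--     sql_query = sql_query.replace("```sql", "").replace("```", "")
--
--     # 寻找SQL语句（通常以SELECT开头）
--     lines = sql_query.split('\n')
--     sql_lines = []
--
--     for line in lines:
--         line = line.strip()
--         # 跳过空行和非SQL内容
--         if line and (line.upper().startswith('SELECT') or
--                     line.upper().startswith('FROM') or
--                     line.upper().startswith('WHERE') or
--                     line.upper().startswith('JOIN') or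
--                     line.upper().startswith('GROUP BY') or
--                     line.upper().startswith('ORDER BY') or
--                     line.upper().startswith('LIMIT') or
--                     line.upper().startswith('HAVING') or
--                     (sql_lines and not line.lower().startswith('here is')) or
--                     (sql_lines and not line.lower().startswith('answer:'))):
--             sql_lines.append(line)
--
--     # 如果找到SQL行，使用它们；否则使用原始清理后的查询
--     if sql_lines:
--         sql_query = ' '.join(sql_lines)
--     else:
--         sql_query = sql_query.strip()
--
--     # 移除多余的空白
--     sql_query = ' '.join(sql_query.split())
--
--     # 确保以分号结尾
--     if not sql_query.endswith(';'):
--         sql_query += ';'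
--
--     return sql_query
-- ===== SOURCE B (Python) =====
-- def _clean_sql(sql_query):
--     """Extract the SQL from LLM output: find the first keyword line, keep everything after."""
--     sql_query = sql_query.replace("```sql", "").replace("```", "")
--     stripped = [l.strip() for l in sql_query.split('\n')]
--     KEYWORDS = ('SELECT', 'FROM', 'WHERE', 'JOIN', 'GROUP BY', 'ORDER BY', 'LIMIT', 'HAVING')
--     idx = next((i for i, l in enumerate(stripped)
--                 if l and l.upper().startswith(KEYWORDS)), None)
--     sql_lines = [l for l in stripped[idx:] if l] if idx is not None else []
--     out = ' '.join(sql_lines) if sql_lines else sql_query.strip()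
--     out = ' '.join(out.split())
--     return out if out.endswith(';') else out + ';'
-- ===== Notes on version B (the rewrite author's own statement) =====
-- stated objective: simpler
-- what changed: Replaces A's stateful accumulating loop (whose 'here is'/'answer:' clauses collapse to 'something was already kept') with a two-stage find-first-keyword-line-then-slice: locate the first non-empty line starting with a SQL keyword, then keep every non-empty stripped line from there on.
import Mathlib
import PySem

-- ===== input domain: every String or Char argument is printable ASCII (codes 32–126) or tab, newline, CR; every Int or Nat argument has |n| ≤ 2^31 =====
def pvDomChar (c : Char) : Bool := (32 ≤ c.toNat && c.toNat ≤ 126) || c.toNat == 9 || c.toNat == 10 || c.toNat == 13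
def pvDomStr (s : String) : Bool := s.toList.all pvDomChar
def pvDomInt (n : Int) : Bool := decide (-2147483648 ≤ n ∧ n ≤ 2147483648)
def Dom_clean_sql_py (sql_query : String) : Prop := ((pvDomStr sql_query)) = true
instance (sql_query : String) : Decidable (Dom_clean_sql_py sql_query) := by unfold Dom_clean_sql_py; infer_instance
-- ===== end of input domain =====

-- B replaces A's stateful accumulating loop with a find-first-keyword-line-then-slice
-- decomposition (simpler); return values agree on all inputs.

-- ===== PORT A =====
-- the loop body of A's 'for line in lines' accumulation (literal: strip, then the big or-chain)
def pvA_step (acc : List (List Char)) (raw : List Char) : List (List Char) :=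
  let line := PySem.Chars.strip raw
  if (decide (line ≠ []) &&
      (PySem.Chars.startswith (PySem.Chars.upper line) "SELECT".toList ||
       PySem.Chars.startswith (PySem.Chars.upper line) "FROM".toList ||
       PySem.Chars.startswith (PySem.Chars.upper line) "WHERE".toList ||
       PySem.Chars.startswith (PySem.Chars.upper line) "JOIN".toList ||
       PySem.Chars.startswith (PySem.Chars.upper line) "GROUP BY".toList ||
       PySem.Chars.startswith (PySem.Chars.upper line) "ORDER BY".toList ||
       PySem.Chars.startswith (PySem.Chars.upper line) "LIMIT".toList ||
       PySem.Chars.startswith (PySem.Chars.upper line) "HAVING".toList ||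
       (decide (acc ≠ []) && !PySem.Chars.startswith (PySem.Chars.lower line) "here is".toList) ||
       (decide (acc ≠ []) && !PySem.Chars.startswith (PySem.Chars.lower line) "answer:".toList)))
  then acc ++ [line] else acc

def clean_sql_py (sql_query : String) : String :=
  let cs := PySem.Chars.replace (PySem.Chars.replace sql_query.toList "```sql".toList []) "```".toList []
  let lines := PySem.Chars.splitOn cs "\n".toList
  let sql_lines := lines.foldl pvA_step []
  let q := if sql_lines ≠ [] then PySem.Chars.join " ".toList sql_lines else PySem.Chars.strip cs
  let q2 := PySem.Chars.join " ".toList (PySem.Chars.split₀ q)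
  String.mk (if PySem.Chars.endswith q2 ";".toList then q2 else q2 ++ ";".toList)

-- ===== PORT B =====
-- Source B: l.upper().startswith(KEYWORDS) with the 8-keyword tuple
def pvB_isKw (l : List Char) : Bool :=
  (["SELECT", "FROM", "WHERE", "JOIN", "GROUP BY", "ORDER BY", "LIMIT", "HAVING"].map String.toList).any
    (fun k => PySem.Chars.startswith (PySem.Chars.upper l) k)

def clean_sql_py_alt (sql_query : String) : String :=
  let body := PySem.Chars.replace (PySem.Chars.replace sql_query.toList "```sql".toList []) "```".toList []
  let stripped := (PySem.Chars.splitOn body "\n".toList).map PySem.Chars.strip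
  let sql_lines :=
    match stripped.findIdx? (fun l => decide (l ≠ []) && pvB_isKw l) with
    | some i => (PySem.List.slice stripped (some (i : Int)) none).filter (fun l => decide (l ≠ []))
    | none => []
  let out := if sql_lines ≠ [] then PySem.Chars.join " ".toList sql_lines else PySem.Chars.strip body
  let out2 := PySem.Chars.join " ".toList (PySem.Chars.split₀ out)
  String.mk (if PySem.Chars.endswith out2 ";".toList then out2 else out2 ++ ";".toList)

-- ===== PRECONDITION & SPEC =====
def Spec_clean_sql_py (sql_query : String) (out : String) : Prop := out = clean_sql_py_alt sql_query
instance (sql_query : String) (out : String) : Decidable (Spec_clean_sql_py sql_query out) := by unfold Spec_clean_sql_py; infer_instance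

-- ===== CLAIM (what is proved, stated in full; the proofs are below) =====
def Claim_equal_clean_sql_py : Prop := ∀ (sql_query : String), Dom_clean_sql_py sql_query → Spec_clean_sql_py sql_query (clean_sql_py sql_query)

-- ===== LEMMAS AND PROOFS =====

-- A's loop body with the strip already performed (pvA_step acc raw = pvA_step' acc (strip raw))
def pvA_step' (acc : List (List Char)) (line : List Char) : List (List Char) :=
  if (decide (line ≠ []) &&
      (PySem.Chars.startswith (PySem.Chars.upper line) "SELECT".toList ||
       PySem.Chars.startswith (PySem.Chars.upper line) "FROM".toList ||
       PySem.Chars.startswith (PySem.Chars.upper line) "WHERE".toList ||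
       PySem.Chars.startswith (PySem.Chars.upper line) "JOIN".toList ||
       PySem.Chars.startswith (PySem.Chars.upper line) "GROUP BY".toList ||
       PySem.Chars.startswith (PySem.Chars.upper line) "ORDER BY".toList ||
       PySem.Chars.startswith (PySem.Chars.upper line) "LIMIT".toList ||
       PySem.Chars.startswith (PySem.Chars.upper line) "HAVING".toList ||
       (decide (acc ≠ []) && !PySem.Chars.startswith (PySem.Chars.lower line) "here is".toList) ||
       (decide (acc ≠ []) && !PySem.Chars.startswith (PySem.Chars.lower line) "answer:".toList)))
  then acc ++ [line] else acc

-- "here is" and "answer:" cannot both be prefixes of the same line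
theorem pv_not_both (l : List Char) :
    (!PySem.Chars.startswith l "here is".toList) || (!PySem.Chars.startswith l "answer:".toList) = true := by
  by_cases h1 : PySem.Chars.startswith l "here is".toList = true
  · by_cases h2 : PySem.Chars.startswith l "answer:".toList = true
    · exfalso
      rw [PySem.Chars.startswith_iff] at h1 h2
      obtain ⟨t1, e1⟩ := h1
      obtain ⟨t2, e2⟩ := h2
      rw [← e2] at e1
      simp at e1
    · simp_all
  · simp_all

-- once something has been kept, every later non-empty line is kept
theorem pv_foldl_nonempty (ls : List (List Char)) :
    ∀ acc : List (List Char), acc ≠ [] →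
      ls.foldl pvA_step' acc = acc ++ ls.filter (fun l => decide (l ≠ [])) := by
  induction ls with
  | nil => intro acc _; simp
  | cons l rest ih =>
    intro acc hacc
    by_cases hl : l = []
    · subst hl
      have hstep : pvA_step' acc [] = acc := by simp [pvA_step']
      simp [List.foldl_cons, hstep, ih acc hacc]
    · have hstep : pvA_step' acc l = acc ++ [l] := by
        have hb := pv_not_both (PySem.Chars.lower l)
        unfold pvA_step'
        rw [if_pos]
        simp only [Bool.and_eq_true, Bool.or_eq_true, Bool.not_eq_true', decide_eq_true_eq]
        refine ⟨hl, ?_⟩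
        simp only [Bool.or_eq_true, Bool.not_eq_true', decide_eq_true_eq] at hb
        tauto
      have hne : (acc ++ [l]) ≠ [] := by simp
      simp [List.foldl_cons, hstep, ih _ hne, hl]

-- with an empty accumulator, the kept lines are exactly: everything non-empty from the
-- first non-empty keyword line onwards
theorem pv_foldl_main (ls : List (List Char)) :
    ls.foldl pvA_step' [] =
      match ls.findIdx? (fun l => decide (l ≠ []) && pvB_isKw l) with
      | some i => (ls.drop i).filter (fun l => decide (l ≠ [])) 
      | none => [] := by
  induction ls with
  | nil => simp
  | cons l rest ih =>
    by_cases hp : (decide (l ≠ []) && pvB_isKw l) = true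
    · obtain ⟨hl, hkw⟩ := Bool.and_eq_true _ _ |>.mp hp
      have hl' : l ≠ [] := of_decide_eq_true hl
      have hstep : pvA_step' [] l = [l] := by
        unfold pvA_step'
        rw [if_pos]
        · rfl
        · simp only [Bool.and_eq_true, Bool.or_eq_true, decide_eq_true_eq]
          refine ⟨hl', ?_⟩
          simp [pvB_isKw] at hkw
          simp
          tauto
      rw [List.foldl_cons, hstep, List.findIdx?_cons, if_pos hp,
          pv_foldl_nonempty rest [l] (by simp)]
      simp [hl']
    · have hstep : pvA_step' [] l = [] := by
        by_cases hl : l = []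
        · simp [pvA_step', hl]
        · have hkw : pvB_isKw l = false := by
            cases hkb : pvB_isKw l
            · rfl
            · exact absurd (by simp [hl, hkb]) hp
          unfold pvA_step'
          rw [if_neg]
          simp only [Bool.and_eq_true, Bool.or_eq_true, decide_eq_true_eq]
          rintro ⟨-, hor⟩
          simp at hor
          have hkt : pvB_isKw l = true := by
            simp [pvB_isKw]
            tauto
          simp [hkt] at hkw
      rw [List.foldl_cons, hstep, List.findIdx?_cons, if_neg hp, ih]
      cases rest.findIdx? (fun l => decide (l ≠ []) && pvB_isKw l) <;> simp

-- ===== VERDICT (by name: the statement is the Claim_ definition above) =====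
theorem clean_sql_py_spec : Claim_equal_clean_sql_py := by
  intro s _
  unfold Spec_clean_sql_py clean_sql_py clean_sql_py_alt
  have key : ∀ cs : List Char,
      (PySem.Chars.splitOn cs "\n".toList).foldl pvA_step [] =
        match ((PySem.Chars.splitOn cs "\n".toList).map PySem.Chars.strip).findIdx?
            (fun l => decide (l ≠ []) && pvB_isKw l) with
        | some i =>
            (PySem.List.slice ((PySem.Chars.splitOn cs "\n".toList).map PySem.Chars.strip)
                (some (i : Int)) none).filter (fun l => decide (l ≠ []))
        | none => [] := by
    intro cs
    have h1 : (PySem.Chars.splitOn cs "\n".toList).foldl pvA_step [] =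
        ((PySem.Chars.splitOn cs "\n".toList).map PySem.Chars.strip).foldl pvA_step' [] := by
      rw [List.foldl_map]
      rfl
    rw [h1, pv_foldl_main]
    cases ((PySem.Chars.splitOn cs "\n".toList).map PySem.Chars.strip).findIdx?
        (fun l => decide (l ≠ []) && pvB_isKw l) with
    | none => rfl
    | some i => simp [PySem.List.slice_from_natCast]
  simp only [key]
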